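-- pv_equiv track=rewrite | github.com/soyanshu002/Scaled_Bubble_Velocity_Detection | src/tracking/vel_track.py | classify_bubbles
-- ===== SOURCE A (Python) =====
-- def classify_bubbles(circles):
--     small, medium, large = [], [], []
--     for c in circles:
--         r = c[2]
--         if r < 6:
--             small.append(c)
--         elif r < 8:
--             medium.append(c)
--         elif r < 10:
--             large.append(c)
--     return small, medium, large
-- ===== SOURCE B (Python) =====
-- def classify_bubbles(circles):
--     small = [c for c in circles if c[2] < 6]
--     medium = [c for c in circles if 6 <= c[2] < 8]
--     large = [c for c in circles if 8 <= c[2] < 10]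
--     return small, medium, large
-- ===== Notes on version B (the rewrite author's own statement) =====
-- stated objective: simpler
-- what changed: A's single loop threading three accumulators through an if/elif cascade is replaced by three independent filter passes (one comprehension per bucket), each selecting its own radius interval; circles with r>=10 match no interval and are dropped.
import Mathlib
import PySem

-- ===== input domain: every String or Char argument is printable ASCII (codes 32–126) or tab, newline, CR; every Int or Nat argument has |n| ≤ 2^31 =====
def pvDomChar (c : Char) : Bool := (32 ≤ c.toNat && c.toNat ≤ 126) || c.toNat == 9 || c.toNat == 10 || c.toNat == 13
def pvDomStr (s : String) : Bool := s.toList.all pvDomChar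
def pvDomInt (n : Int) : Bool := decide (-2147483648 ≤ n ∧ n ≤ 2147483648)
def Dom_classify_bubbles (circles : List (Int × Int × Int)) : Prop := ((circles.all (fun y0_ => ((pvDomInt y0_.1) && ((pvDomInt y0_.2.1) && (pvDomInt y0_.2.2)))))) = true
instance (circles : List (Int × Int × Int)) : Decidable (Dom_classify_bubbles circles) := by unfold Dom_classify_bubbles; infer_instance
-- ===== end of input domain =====

-- B replaces A's single accumulator loop with three independent filter passes, one per radius interval (simpler; same return value).


-- ===== PORT A =====
def classify_bubbles (circles : List (Int × Int × Int)) : (List (Int × Int × Int)) × (List (Int × Int × Int)) × (List (Int × Int × Int)) :=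
  circles.foldl (fun acc c =>
    let r := c.2.2
    if r < 6 then (acc.1 ++ [c], acc.2.1, acc.2.2)
    else if r < 8 then (acc.1, acc.2.1 ++ [c], acc.2.2)
    else if r < 10 then (acc.1, acc.2.1, acc.2.2 ++ [c])
    else acc) ([], [], [])

-- ===== PORT B =====
def classify_bubbles_alt (circles : List (Int × Int × Int)) : (List (Int × Int × Int)) × (List (Int × Int × Int)) × (List (Int × Int × Int)) :=
  let small := circles.filter (fun c => c.2.2 < 6)
  let medium := circles.filter (fun c => 6 ≤ c.2.2 && c.2.2 < 8)
  let large := circles.filter (fun c => 8 ≤ c.2.2 && c.2.2 < 10)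
  (small, medium, large)

-- ===== PRECONDITION & SPEC =====
def Spec_classify_bubbles (circles : List (Int × Int × Int)) (out : (List (Int × Int × Int)) × (List (Int × Int × Int)) × (List (Int × Int × Int))) : Prop := out = classify_bubbles_alt circles
instance (circles : List (Int × Int × Int)) (out : (List (Int × Int × Int)) × (List (Int × Int × Int)) × (List (Int × Int × Int))) : Decidable (Spec_classify_bubbles circles out) := by unfold Spec_classify_bubbles; infer_instance

-- ===== CLAIM (what is proved, stated in full; the proofs are below) =====
def Claim_equal_classify_bubbles : Prop := ∀ (circles : List (Int × Int × Int)), Dom_classify_bubbles circles → Spec_classify_bubbles circles (classify_bubbles circles)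

-- ===== LEMMAS AND PROOFS =====
-- Loop invariant: A's fold, started from any accumulator, appends exactly the three filters.
theorem classify_fold_filter (circles : List (Int × Int × Int))
    (s m l : List (Int × Int × Int)) :
    circles.foldl (fun acc c =>
      let r := c.2.2
      if r < 6 then (acc.1 ++ [c], acc.2.1, acc.2.2)
      else if r < 8 then (acc.1, acc.2.1 ++ [c], acc.2.2)
      else if r < 10 then (acc.1, acc.2.1, acc.2.2 ++ [c])
      else acc) (s, m, l)
    = (s ++ circles.filter (fun c => c.2.2 < 6),
       m ++ circles.filter (fun c => 6 ≤ c.2.2 && c.2.2 < 8),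
       l ++ circles.filter (fun c => 8 ≤ c.2.2 && c.2.2 < 10)) := by
  induction circles generalizing s m l with
  | nil => simp
  | cons c cs ih =>
    simp only [List.foldl_cons, List.filter_cons]
    by_cases h6 : c.2.2 < 6
    · simp [h6, show ¬ (6 ≤ c.2.2) by omega, show ¬ (8 ≤ c.2.2) by omega, ih]
    · by_cases h8 : c.2.2 < 8
      · simp [h6, h8, show (6:Int) ≤ c.2.2 by omega, show ¬ (8 ≤ c.2.2) by omega, ih]
      · by_cases h10 : c.2.2 < 10
        · simp [h6, h8, h10, show (8:Int) ≤ c.2.2 by omega, ih]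
        · simp [h6, h8, show ¬ (c.2.2 < 10) by omega, show (8:Int) ≤ c.2.2 by omega, ih]

-- ===== VERDICT (by name: the statement is the Claim_ definition above) =====
theorem classify_bubbles_spec : Claim_equal_classify_bubbles := by
  intro circles _
  unfold Spec_classify_bubbles classify_bubbles classify_bubbles_alt
  simp [classify_fold_filter]
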